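-- pv_equiv track=rewrite | github.com/amarzal/coana | coana/apps/editor_tree.py | _detectar_duplicados
-- ===== SOURCE A (Python) =====
-- def _detectar_duplicados(líneas: list[str]) -> set[int]:
--     """Devuelve el conjunto de números de línea (1-based) con identificador duplicado."""
--     vistos: dict[str, list[int]] = {}
--     for i, línea in enumerate(líneas, 1):
--         if not línea.strip():
--             continue
--         partes = línea.rsplit("|", 1)
--         if len(partes) < 2:
--             continue
--         ident = partes[1].strip()
--         if not ident:
--             continue
--         vistos.setdefault(ident, []).append(i)
--
--     duplicadas: set[int] = set()
--     for nums in vistos.values():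
--         if len(nums) > 1:
--             duplicadas.update(nums)
--     return duplicadas
-- ===== SOURCE B (Python) =====
-- def _detectar_duplicados(líneas: list[str]) -> set[int]:
--     """Devuelve el conjunto de números de línea (1-based) con identificador duplicado."""
--     # one parse pass -> (line, ident) pairs; count occurrences; then emit lines of over-counted idents
--     pares: list[tuple[int, str]] = []
--     for i, línea in enumerate(líneas, 1):
--         if not línea.strip():
--             continue
--         partes = línea.rsplit("|", 1)
--         if len(partes) < 2:
--             continue
--         ident = partes[1].strip()
--         if not ident:
--             continue
--         pares.append((i, ident))
--
--     cuenta: dict[str, int] = {}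
--     for _, d in pares:
--         cuenta[d] = cuenta.get(d, 0) + 1
--
--     duplicadas: set[int] = set()
--     for d, c in cuenta.items():
--         if c > 1:
--             duplicadas.update(i for i, e in pares if e == d)
--     return duplicadas
-- ===== Notes on version B (the rewrite author's own statement) =====
-- stated objective: alternative
-- what changed: Replaces the dict-of-line-number-lists grouping with a flat (line, ident) pair list plus an occurrence counter, then re-scans the pair list to emit the lines of each ident whose count exceeds 1 (count-then-filter instead of group-then-flatten).
import Mathlib
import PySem

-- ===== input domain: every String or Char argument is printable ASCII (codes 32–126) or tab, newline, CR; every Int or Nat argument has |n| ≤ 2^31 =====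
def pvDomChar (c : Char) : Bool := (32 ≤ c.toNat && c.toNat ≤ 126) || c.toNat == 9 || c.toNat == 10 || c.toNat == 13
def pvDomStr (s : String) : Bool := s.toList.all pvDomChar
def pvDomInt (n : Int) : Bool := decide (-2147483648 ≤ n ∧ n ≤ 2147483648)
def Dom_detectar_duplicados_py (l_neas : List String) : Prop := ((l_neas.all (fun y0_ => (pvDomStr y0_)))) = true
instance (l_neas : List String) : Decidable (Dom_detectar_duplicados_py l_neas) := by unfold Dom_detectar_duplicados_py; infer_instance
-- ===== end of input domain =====

-- B replaces A's dict of per-identifier line-number lists by a flat (line, ident) pair list plus an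
-- occurrence counter, then re-scans the pairs for each over-counted identifier (count-then-filter);
-- same return value, no speed claim.

-- hand-port of s.rsplit("|", 1) for the single-char separator (PySem has no rsplit):
-- none when '|' does not occur (Python: the 1-element list [s]), else some (before, after), the split
-- at the LAST '|' (Python: the 2-element list [before, after]); exact on all inputs.
def pvRsplitBar : List Char → Option (List Char × List Char)
  | [] => none
  | c :: rest =>
    match pvRsplitBar rest with
    | some (a, b) => some (c :: a, b)
    | none => if c = '|' then some ([], rest) else none

-- ===== PORT A =====
def detectar_duplicados_py (l_neas : List String) : List Int :=
  let vistos : PySem.Dict (List Char) (List Int) :=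
    (PySem.List.enumerate l_neas 1).foldl (fun d p =>
      if PySem.Chars.strip p.2.toList = [] then d
      else
        match pvRsplitBar p.2.toList with
        | none => d  -- len(partes) < 2
        | some (_, despues) =>
          let ident := PySem.Chars.strip despues
          if ident = [] then d
          else d.modify ident [] (· ++ [p.1]))  -- vistos.setdefault(ident, []).append(i)
      PySem.Dict.empty
  vistos.values.foldl (fun duplicadas nums =>
    if nums.length > 1 then PySem.Set.update duplicadas nums else duplicadas) PySem.Set.empty

-- ===== PORT B =====
def detectar_duplicados_py_alt (l_neas : List String) : List Int :=
  let pares : List (Int × List Char) :=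
    (PySem.List.enumerate l_neas 1).foldl (fun acc p =>
      if PySem.Chars.strip p.2.toList = [] then acc
      else
        match pvRsplitBar p.2.toList with
        | none => acc
        | some (_, despues) =>
          let ident := PySem.Chars.strip despues
          if ident = [] then acc
          else acc ++ [(p.1, ident)])
      []
  let cuenta : PySem.Dict (List Char) Int :=
    pares.foldl (fun c q => c.insert q.2 (c.getD q.2 0 + 1)) PySem.Dict.empty
  cuenta.items.foldl (fun duplicadas pr =>
    if pr.2 > 1 then
      PySem.Set.update duplicadas ((pares.filter (fun q => q.2 == pr.1)).map (fun q => q.1))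
    else duplicadas) PySem.Set.empty

-- ===== PRECONDITION & SPEC =====
def Spec_detectar_duplicados_py (l_neas : List String) (out : List Int) : Prop := out = detectar_duplicados_py_alt l_neas
instance (l_neas : List String) (out : List Int) : Decidable (Spec_detectar_duplicados_py l_neas out) := by unfold Spec_detectar_duplicados_py; infer_instance

-- ===== CLAIM (what is proved, stated in full; the proofs are below) =====
def Claim_equal_detectar_duplicados_py : Prop := ∀ (l_neas : List String), Dom_detectar_duplicados_py l_neas → Spec_detectar_duplicados_py l_neas (detectar_duplicados_py l_neas)

-- ===== LEMMAS AND PROOFS =====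

-- the parse step both loops share, as a partial function yielding B's (line, ident) pair
def pvParse (p : Int × String) : Option (Int × List Char) :=
  if PySem.Chars.strip p.2.toList = [] then none
  else
    match pvRsplitBar p.2.toList with
    | none => none
    | some (_, despues) =>
      let ident := PySem.Chars.strip despues
      if ident = [] then none else some (p.1, ident)

-- B's pair-collecting loop is the filterMap of pvParse
theorem pares_eq (l : List (Int × String)) :
    l.foldl (fun acc p =>
      if PySem.Chars.strip p.2.toList = [] then acc
      else
        match pvRsplitBar p.2.toList with
        | none => acc
        | some (_, despues) =>
          let ident := PySem.Chars.strip despues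
          if ident = [] then acc
          else acc ++ [(p.1, ident)]) []
    = l.filterMap pvParse := by
  have h : l.filterMap pvParse = (l.filterMap pvParse).foldl (fun acc x => acc ++ [x]) [] := by
    rw [PySem.List.foldl_append_singleton_eq_self, List.nil_append]
  rw [h, List.foldl_filterMap]
  apply PySem.List.foldl_congr_mem
  intro acc p _
  by_cases h1 : PySem.Chars.strip p.2.toList = []
  · simp [pvParse, h1]
  · cases h2 : pvRsplitBar p.2.toList with
    | none => simp [pvParse, h1, h2]
    | some pr =>
      obtain ⟨a, b⟩ := pr
      by_cases h3 : PySem.Chars.strip b = [] <;> simp [pvParse, h1, h2, h3]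

-- A's dict-building loop is the grouping fold over the same filterMap
theorem vistos_eq (l : List (Int × String)) :
    l.foldl (fun d p =>
      if PySem.Chars.strip p.2.toList = [] then d
      else
        match pvRsplitBar p.2.toList with
        | none => d
        | some (_, despues) =>
          let ident := PySem.Chars.strip despues
          if ident = [] then d
          else d.modify ident [] (· ++ [p.1])) PySem.Dict.empty
    = (l.filterMap pvParse).foldl (fun d q => d.modify q.2 [] (· ++ [q.1])) PySem.Dict.empty := by
  rw [List.foldl_filterMap]
  apply PySem.List.foldl_congr_mem
  intro acc p _
  by_cases h1 : PySem.Chars.strip p.2.toList = []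
  · simp [pvParse, h1]
  · cases h2 : pvRsplitBar p.2.toList with
    | none => simp [pvParse, h1, h2]
    | some pr =>
      obtain ⟨a, b⟩ := pr
      by_cases h3 : PySem.Chars.strip b = [] <;> simp [pvParse, h1, h2, h3]

-- group-then-flatten over the dict of lists = count-then-filter over the counter, for ANY pair list p
theorem outputs_eq (p : List (Int × List Char)) :
    ((p.foldl (fun d q => d.modify q.2 [] (· ++ [q.1])) PySem.Dict.empty).values).foldl
      (fun duplicadas nums =>
        if nums.length > 1 then PySem.Set.update duplicadas nums else duplicadas) PySem.Set.empty
    = ((p.foldl (fun c q => c.insert q.2 (c.getD q.2 0 + 1))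
          (PySem.Dict.empty : PySem.Dict (List Char) Int)).items).foldl
      (fun duplicadas pr =>
        if pr.2 > 1 then
          PySem.Set.update duplicadas ((p.filter (fun q => q.2 == pr.1)).map (fun q => q.1))
        else duplicadas) PySem.Set.empty := by
  have hkeys : (p.foldl (fun d q => d.modify q.2 [] (· ++ [q.1])) PySem.Dict.empty).keys
      = PySem.Set.update (PySem.Dict.empty (κ := List Char) (ν := List Int)).keys (p.map (fun q => q.2)) :=
    PySem.Dict.keys_foldl_modify_key p (fun q => q.2) [] (fun _ q => (· ++ [q.1])) PySem.Dict.empty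
  have hkeys' : (p.foldl (fun d q => d.modify q.2 [] (· ++ [q.1])) PySem.Dict.empty).keys
      = PySem.Set.ofList (p.map (fun q => q.2)) := by
    rw [hkeys, PySem.Dict.keys_empty]; rfl
  have hnd : (p.foldl (fun d q => d.modify q.2 [] (· ++ [q.1])) PySem.Dict.empty).keys.Nodup :=
    PySem.Dict.nodup_keys_foldl_modify_key p (fun q => q.2) [] (fun _ q => (· ++ [q.1]))
      PySem.Dict.empty (by rw [PySem.Dict.keys_empty]; exact List.nodup_nil)
  have hswap : p.foldl (fun d q => d.modify q.2 [] (· ++ [q.1])) PySem.Dict.empty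
      = (p.map Prod.swap).foldl (fun d r => d.modify r.1 [] (· ++ [r.2])) PySem.Dict.empty := by
    rw [List.foldl_map]; rfl
  have hget : ∀ c, (p.foldl (fun d q => d.modify q.2 [] (· ++ [q.1])) PySem.Dict.empty).getD c []
      = (p.filter (fun q => q.2 == c)).map (fun q => q.1) := by
    intro c
    rw [hswap, PySem.Dict.getD_foldl_modify_append, PySem.Dict.getD_empty, List.filter_map,
      List.map_map, List.nil_append]
    simp [Function.comp_def]
  have hvalues : (p.foldl (fun d q => d.modify q.2 [] (· ++ [q.1])) PySem.Dict.empty).values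
      = (PySem.Set.ofList (p.map (fun q => q.2))).map
          (fun c => (p.filter (fun q => q.2 == c)).map (fun q => q.1)) := by
    rw [PySem.Dict.values_eq_map_keys _ hnd [], hkeys']
    exact List.map_congr_left (fun c _ => hget c)
  have hcuenta : p.foldl (fun c q => c.insert q.2 (c.getD q.2 0 + 1))
        (PySem.Dict.empty : PySem.Dict (List Char) Int)
      = PySem.Dict.counter (p.map (fun q => q.2)) := by
    rw [← PySem.Dict.foldl_insert_getD_add_one_eq_counter, List.foldl_map]
  rw [hvalues, hcuenta, PySem.Dict.items_counter, List.foldl_map, List.foldl_map]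
  apply PySem.List.foldl_congr_mem
  intro acc c _
  dsimp only
  have hcnt : List.count c (p.map (fun q => q.2))
      = ((p.filter (fun q => q.2 == c)).map (fun q => q.1)).length := by
    simp [List.count_eq_countP, ← List.countP_eq_length_filter, List.countP_map, Function.comp_def]
  by_cases h : 1 < ((p.filter (fun q => q.2 == c)).map (fun q => q.1)).length
  · rw [if_pos h, if_pos (by rw [hcnt]; exact_mod_cast h)]
  · rw [if_neg h, if_neg (by rw [hcnt]; intro hx; exact h (by exact_mod_cast hx))]

-- ===== VERDICT (by name: the statement is the Claim_ definition above) =====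
theorem detectar_duplicados_py_spec : Claim_equal_detectar_duplicados_py := by
  intro l_neas _
  unfold Spec_detectar_duplicados_py
  simp only [detectar_duplicados_py, detectar_duplicados_py_alt]
  rw [vistos_eq, pares_eq]
  exact outputs_eq _
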